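-- pv_equiv track=rewrite | github.com/saulspatz/maverick | scripts/ranks.py | flipped
-- ===== SOURCE A (Python) =====
-- def flipped(ranks):
--     low = 2
--     high = 1 << 12
--     while high > low:
--         if (ranks & high) and not (ranks & low):
--             return 1
--         if (ranks & low) and not (ranks & high):
--             return -1
--         high >>= 1
--         low <<= 1
--     return 0
-- ===== SOURCE B (Python) =====
-- def flipped(ranks):
--     # Pack the high bits 12..7 and the low bits 1..6 (outermost pair first)
--     # into two 6-bit numbers, then compare once: sign(h - l) is the direction
--     # of the outermost differing pair.
--     h = l = 0
--     for i in range(6):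
--         h = (h << 1) | ((ranks >> (12 - i)) & 1)
--         l = (l << 1) | ((ranks >> (1 + i)) & 1)
--     return (h > l) - (h < l)
-- ===== Notes on version B (the rewrite author's own statement) =====
-- stated objective: alternative
-- what changed: Replaces A's outer-in while loop that early-returns at the first asymmetric bit pair with a single pass that packs the high half and the low half of the mask into two six-bit integers (outermost pair as most significant) and returns the sign of one comparison.
import Mathlib
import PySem

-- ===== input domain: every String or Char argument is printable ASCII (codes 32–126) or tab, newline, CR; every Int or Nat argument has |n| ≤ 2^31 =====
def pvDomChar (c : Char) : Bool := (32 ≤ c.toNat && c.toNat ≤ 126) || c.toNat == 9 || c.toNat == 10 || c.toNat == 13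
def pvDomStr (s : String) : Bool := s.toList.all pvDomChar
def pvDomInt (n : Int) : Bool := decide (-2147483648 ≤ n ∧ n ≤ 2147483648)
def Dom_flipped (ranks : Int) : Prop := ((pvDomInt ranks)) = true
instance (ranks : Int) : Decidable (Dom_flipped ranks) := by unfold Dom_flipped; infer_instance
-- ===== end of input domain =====

-- B replaces A's outer-in early-return pairwise bit scan by packing the high half
-- and the low half of the mask into two six-bit numbers and comparing them once (objective: alternative).

-- ===== PORT A =====
-- A's while loop as fuel recursion; fuel 7 is a totality guard only: started at
-- high = 2^12, low = 2, the loop condition fails after at most 6 iterations.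
def flippedLoop (ranks : Int) : Nat → Int → Int → Int
  | 0, _, _ => 0
  | fuel+1, high, low =>
    if high > low then
      if PySem.Int.band ranks high ≠ 0 ∧ PySem.Int.band ranks low = 0 then 1
      else if PySem.Int.band ranks low ≠ 0 ∧ PySem.Int.band ranks high = 0 then -1
      else flippedLoop ranks fuel (high >>> 1) (low <<< 1)
    else 0

def flipped (ranks : Int) : Int := flippedLoop ranks 7 ((1:Int) <<< 12) 2

-- ===== PORT B =====
def flipped_alt (ranks : Int) : Int :=
  let hl := (List.range 6).foldl
    (fun (hl : Int × Int) (i : Nat) =>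
      (PySem.Int.bor (hl.1 <<< 1) (PySem.Int.band (ranks >>> (12 - i)) 1),
       PySem.Int.bor (hl.2 <<< 1) (PySem.Int.band (ranks >>> (1 + i)) 1)))
    (0, 0)
  (if hl.1 > hl.2 then 1 else 0) - (if hl.1 < hl.2 then 1 else 0)

-- ===== PRECONDITION & SPEC =====
def Spec_flipped (ranks : Int) (out : Int) : Prop := out = flipped_alt ranks
instance (ranks : Int) (out : Int) : Decidable (Spec_flipped ranks out) := by unfold Spec_flipped; infer_instance

-- ===== CLAIM (what is proved, stated in full; the proofs are below) =====
def Claim_equal_flipped : Prop := ∀ (ranks : Int), Dom_flipped ranks → Spec_flipped ranks (flipped ranks)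

-- ===== LEMMAS AND PROOFS =====

-- Bit k of r, as a Bool (Python's infinite two's complement: arithmetic shift + parity).
def bitb (r : Int) (k : Nat) : Bool := decide ((r >>> k) % 2 = 1)

theorem mod_two_eq (x : Int) : PySem.Int.mod x 2 = x % 2 := by
  simp [PySem.Int.mod, Int.fmod_eq_emod]

-- B's bit extraction (ranks >> k) & 1 in terms of bitb.
theorem band_shift_one (r : Int) (k : Nat) :
    PySem.Int.band (r >>> k) 1 = if bitb r k then 1 else 0 := by
  rw [PySem.Int.band_one, mod_two_eq, bitb]
  by_cases h : (r >>> k) % 2 = 1 <;> simp [h]; omega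

-- A's mask test ranks & 2^k in terms of bitb.
theorem band_two_pow (r : Int) (k : Nat) :
    PySem.Int.band r ((2:Int)^k) = if bitb r k then 2^k else 0 := by
  cases r with
  | ofNat n =>
    have h2 : ((n : Int)) >>> k = ((n >>> k : Nat) : Int) := rfl
    have hb : bitb ((n : Nat) : Int) k = n.testBit k := by
      rw [bitb, Nat.testBit_eq_decide_div_mod_eq, h2, Nat.shiftRight_eq_div_pow]
      simp only [decide_eq_decide]
      omega
    rw [show (Int.ofNat n) = ((n:Nat):Int) from rfl,
        show ((2:Int)^k) = ((2^k : Nat) : Int) by push_cast; ring,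
        PySem.Int.band_natCast, Nat.and_two_pow, hb]
    cases htb : n.testBit k <;> simp
  | negSucc n =>
    have hb : bitb (Int.negSucc n) k = ! n.testBit k := by
      rw [bitb, Nat.testBit_eq_decide_div_mod_eq, ← Nat.shiftRight_eq_div_pow,
          show (Int.negSucc n) >>> k = Int.negSucc (n >>> k) from rfl, Int.negSucc_eq]
      generalize n >>> k = m
      by_cases h : m % 2 = 1 <;> simp [h] <;> omega
    rw [hb, Int.negSucc_eq, PySem.Int.band,
        if_neg (by omega : ¬ (0:Int) ≤ -(↑n + 1)), if_pos (by positivity : (0:Int) ≤ 2^k)]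
    rw [show (- -((n:Int) + 1) - 1) = (n:Int) by ring, Int.toNat_natCast,
        show ((2:Int)^k) = ((2^k : Nat) : Int) by push_cast; ring, Int.toNat_natCast,
        Nat.and_comm, Nat.and_two_pow]
    cases htb : n.testBit k <;> simp

-- One unfolding step of A's loop while the loop condition holds.
theorem stepA (r : Int) (f : Nat) (H L : Int) (h : H > L) :
    flippedLoop r (f+1) H L =
      if PySem.Int.band r H ≠ 0 ∧ PySem.Int.band r L = 0 then 1
      else if PySem.Int.band r L ≠ 0 ∧ PySem.Int.band r H = 0 then -1
      else flippedLoop r f (H >>> 1) (L <<< 1) := by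
  rw [flippedLoop, if_pos h]

-- ===== VERDICT (by name: the statement is the Claim_ definition above) =====
set_option maxHeartbeats 1000000 in
theorem flipped_spec : Claim_equal_flipped := by
  intro r _
  unfold Spec_flipped flipped
  have e12 := band_two_pow r 12
  have e11 := band_two_pow r 11
  have e10 := band_two_pow r 10
  have e9 := band_two_pow r 9
  have e8 := band_two_pow r 8
  have e7 := band_two_pow r 7
  have e6 := band_two_pow r 6
  have e5 := band_two_pow r 5
  have e4 := band_two_pow r 4
  have e3 := band_two_pow r 3
  have e2 := band_two_pow r 2
  have e1 := band_two_pow r 1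
  norm_num at e12 e11 e10 e9 e8 e7 e6 e5 e4 e3 e2 e1
  rw [show ((1:Int) <<< 12 : Int) = 4096 from rfl,
      show flippedLoop r 7 4096 2 = _ from stepA r 6 4096 2 (by decide),
      show (4096:Int) >>> 1 = 2048 from rfl, show (2:Int) <<< 1 = 4 from rfl,
      stepA r 5 2048 4 (by decide),
      show (2048:Int) >>> 1 = 1024 from rfl, show (4:Int) <<< 1 = 8 from rfl,
      stepA r 4 1024 8 (by decide),
      show (1024:Int) >>> 1 = 512 from rfl, show (8:Int) <<< 1 = 16 from rfl,
      stepA r 3 512 16 (by decide),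
      show (512:Int) >>> 1 = 256 from rfl, show (16:Int) <<< 1 = 32 from rfl,
      stepA r 2 256 32 (by decide),
      show (256:Int) >>> 1 = 128 from rfl, show (32:Int) <<< 1 = 64 from rfl,
      stepA r 1 128 64 (by decide),
      show (128:Int) >>> 1 = 64 from rfl, show (64:Int) <<< 1 = 128 from rfl,
      show flippedLoop r 1 64 128 = 0 from by rw [flippedLoop, if_neg (by decide)]]
  unfold flipped_alt
  rw [show List.range 6 = [0,1,2,3,4,5] from rfl]
  simp only [List.foldl]
  norm_num
  rw [e12, e11, e10, e9, e8, e7, e6, e5, e4, e3, e2, e1,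
      band_shift_one, band_shift_one, band_shift_one, band_shift_one, band_shift_one,
      band_shift_one, band_shift_one, band_shift_one, band_shift_one, band_shift_one,
      band_shift_one, band_shift_one]
  generalize bitb r 12 = a1
  generalize bitb r 11 = a2
  generalize bitb r 10 = a3
  generalize bitb r 9 = a4
  generalize bitb r 8 = a5
  generalize bitb r 7 = a6
  generalize bitb r 1 = b1
  generalize bitb r 2 = b2
  generalize bitb r 3 = b3
  generalize bitb r 4 = b4
  generalize bitb r 5 = b5
  generalize bitb r 6 = b6
  revert a1 a2 a3 a4 a5 a6 b1 b2 b3 b4 b5 b6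
  decide
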